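-- pv_equiv track=rewrite | github.com/matthieu-d4r/adventofcode | year2015/src/day_05.py | part_2
-- ===== SOURCE A (Python) =====
-- from collections import Counter
-- from itertools import pairwise
--
-- def part_2(strings: str) -> int:
--     nice = 0
--     for string in strings.splitlines():
--         c = Counter("".join(x) for x in pairwise(string))
--
--         if not any(string.count(x) > 1 for x in c):
--             continue
--         if not any(string[i] == string[i + 2] for i in range(len(string) - 2)):
--             continue
--
--         nice += 1
--     return nice
-- ===== SOURCE B (Python) =====
-- from itertools import pairwise
--
-- def part_2(strings: str) -> int:
--     nice = 0
--     for s in strings.splitlines():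
--         first = {}
--         has_pair = False
--         for i, p in enumerate(pairwise(s)):
--             if p in first:
--                 if first[p] <= i - 2:
--                     has_pair = True
--             else:
--                 first[p] = i
--         has_xyx = False
--         for x, z in zip(s, s[2:]):
--             if x == z:
--                 has_xyx = True
--         if has_pair and has_xyx:
--             nice += 1
--     return nice
-- ===== Notes on version B (the rewrite author's own statement) =====
-- stated objective: alternative
-- what changed: Per line, B makes a single pass that records the first index of each adjacent character pair in a dict (a repeat at distance >= 2 is a non-overlapping double pair) and scans zip(s, s[2:]) for the xyx condition, instead of building a Counter of pairs and re-scanning the whole line with str.count for each distinct pair.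
import Mathlib
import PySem

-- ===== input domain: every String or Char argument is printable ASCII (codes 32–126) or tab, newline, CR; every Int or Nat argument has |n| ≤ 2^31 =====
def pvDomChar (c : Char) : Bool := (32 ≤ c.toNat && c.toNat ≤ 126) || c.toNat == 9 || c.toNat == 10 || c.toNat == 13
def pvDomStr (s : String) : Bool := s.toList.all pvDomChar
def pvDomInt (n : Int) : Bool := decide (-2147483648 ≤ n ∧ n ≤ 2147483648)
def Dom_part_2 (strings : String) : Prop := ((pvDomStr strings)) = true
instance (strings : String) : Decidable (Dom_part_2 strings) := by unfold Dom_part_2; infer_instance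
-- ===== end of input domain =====

-- B replaces the Counter + per-pair str.count rescans with a single pass per line that records
-- the first index of each adjacent pair (a repeat at distance ≥ 2 is non-overlapping) plus a
-- zip(s, s[2:]) scan for the xyx condition; objective: alternative (not measured faster).

-- ===== PORT A =====
def part_2 (strings : String) : Int :=
  (PySem.Str.splitlines strings).foldl (fun nice string =>
    -- c = Counter("".join(x) for x in pairwise(string)); pairwise(s) = zip(s, s[1:])
    let c := PySem.Dict.counter ((string.toList.zip string.toList.tail).map
               (fun x => String.ofList [x.1, x.2]))
    if !(c.keys.any fun x => decide (1 < PySem.Str.count string x)) then nice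
    else if !((PySem.List.pyRange 0 (PySem.Str.len string - 2) 1).any fun i =>
        PySem.Str.pyGet? string i == PySem.Str.pyGet? string (i + 2)) then nice
    else nice + 1) 0

-- ===== PORT B =====
-- one line of Source B's loop body: first-index dict over enumerate(pairwise(s)), then zip(s, s[2:])
def pvLineNice (s : String) : Bool :=
  let st := (PySem.List.enumerate (s.toList.zip s.toList.tail) 0).foldl
    (fun (st : PySem.Dict (Char × Char) Int × Bool) ip =>
      if st.1.contains ip.2 then
        (st.1, if st.1.getD ip.2 0 ≤ ip.1 - 2 then true else st.2)
      else (st.1.insert ip.2 ip.1, st.2)) (PySem.Dict.empty, false)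
  let hx := (s.toList.zip (PySem.List.slice s.toList (some 2) none)).foldl
    (fun acc xz => if xz.1 == xz.2 then true else acc) false
  st.2 && hx

def part_2_alt (strings : String) : Int :=
  (PySem.Str.splitlines strings).foldl
    (fun nice s => if pvLineNice s then nice + 1 else nice) 0

-- ===== PRECONDITION & SPEC =====
def Spec_part_2 (strings : String) (out : Int) : Prop := out = part_2_alt strings
instance (strings : String) (out : Int) : Decidable (Spec_part_2 strings out) := by unfold Spec_part_2; infer_instance

-- ===== CLAIM (what is proved, stated in full; the proofs are below) =====
def Claim_equal_part_2 : Prop := ∀ (strings : String), Dom_part_2 strings → Spec_part_2 strings (part_2 strings)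

-- ===== LEMMAS AND PROOFS =====

def pvCnt2 (a b : Char) : List Char → Nat
  | x :: y :: t => if x = a ∧ y = b then pvCnt2 a b t + 1 else pvCnt2 a b (y :: t)
  | _ => 0

theorem pvCount_go_eq (a b : Char) : ∀ (fuel : Nat) (l : List Char) (acc : Nat),
    l.length ≤ fuel → PySem.Chars.count.go [a, b] fuel l acc = acc + pvCnt2 a b l := by
  intro fuel
  induction fuel with
  | zero =>
    intro l acc h
    have : l = [] := List.eq_nil_of_length_eq_zero (Nat.le_zero.mp h)
    subst this
    simp [PySem.Chars.count.go, pvCnt2]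
  | succ n ih =>
    intro l acc h
    match l with
    | [] => simp [PySem.Chars.count.go, pvCnt2]
    | [x] =>
      have hpre : ([a, b].isPrefixOf [x]) = false := by
        simp [List.isPrefixOf]
      simp [PySem.Chars.count.go, hpre, pvCnt2]
      rw [ih [] acc (by simp)]
      simp [pvCnt2]
    | x :: y :: t =>
      by_cases hab : x = a ∧ y = b
      · obtain ⟨hx, hy⟩ := hab
        subst hx; subst hy
        have hpre : ([x, y].isPrefixOf (x :: y :: t)) = true := by
          simp [List.isPrefixOf]
        simp only [PySem.Chars.count.go, hpre, if_true]
        have hdrop : List.drop ([x, y].length) (x :: y :: t) = t := by simp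
        rw [hdrop, ih t (acc + 1) (by simp at h ⊢; omega)]
        simp [pvCnt2]
        omega
      · have hpre : ([a, b].isPrefixOf (x :: y :: t)) = false := by
          simp [List.isPrefixOf]
          intro hx hy
          exact absurd ⟨hx.symm, hy.symm⟩ hab
        simp only [PySem.Chars.count.go, hpre]
        simp only [Bool.false_eq_true, if_false]
        rw [ih (y :: t) acc (by simp at h ⊢; omega)]
        simp [pvCnt2, hab]

theorem pvCount_eq_cnt2 (s : List Char) (a b : Char) :
    PySem.Chars.count s [a, b] = pvCnt2 a b s := by
  simp [PySem.Chars.count]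
  rw [pvCount_go_eq a b s.length s 0 (le_refl _)]
  omega

theorem pvMem_zip_iff (a b : Char) : ∀ (cs : List Char),
    ((a, b) ∈ cs.zip cs.tail ↔ 1 ≤ pvCnt2 a b cs) := by
  intro cs
  induction cs using pvCnt2.induct a b with
  | case1 x y t hab iht =>
    obtain ⟨hx, hy⟩ := hab; subst hx; subst hy
    simp [pvCnt2]
  | case2 x y t hab ihy =>
    have hne : (a, b) ≠ (x, y) := by
      intro he; injection he with h1 h2; exact hab ⟨h1.symm, h2.symm⟩
    simp only [List.tail_cons, List.zip_cons_cons, List.mem_cons]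
    rw [show ((y :: t).zip t) = ((y :: t).zip (y :: t).tail) by simp]
    rw [show pvCnt2 a b (x :: y :: t) = pvCnt2 a b (y :: t) by simp [pvCnt2, hab]]
    constructor
    · rintro (h | h)
      · exact absurd h hne
      · exact ihy.mp h
    · intro h
      exact Or.inr (ihy.mpr h)
  | case3 t ht =>
    match t, ht with
    | [], _ => simp [pvCnt2]
    | [x], _ => simp [pvCnt2]
    | x :: y :: t, ht => exact absurd rfl (ht x y t)

theorem pvAP_cons (x y : Char) (t : List Char) :
    (x :: y :: t).zip (x :: y :: t).tail = (x, y) :: ((y :: t).zip (y :: t).tail) := by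
  simp

theorem pvAP_drop_one (y : Char) (t : List Char) :
    ((y :: t).zip (y :: t).tail).drop 1 = t.zip t.tail := by
  cases t with
  | nil => simp
  | cons c t' => rw [pvAP_cons]; simp

theorem pvMem_drop_two {α : Type} (u v w : List α) (q : α) (hv : v ≠ []) :
    q ∈ (u ++ q :: v ++ q :: w).drop 2 := by
  have hlen : 2 ≤ (u ++ q :: v).length := by
    obtain ⟨v0, v', rfl⟩ := List.exists_cons_of_ne_nil hv
    simp; omega
  have hshape : u ++ q :: v ++ q :: w = (u ++ q :: v) ++ q :: w := by simp
  rw [hshape, List.drop_append_of_le_length hlen]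
  simp

theorem pvCnt2_ge2_of_decomp (a b : Char) : ∀ (cs : List Char) (u v w : List (Char × Char)),
    cs.zip cs.tail = u ++ (a, b) :: v ++ (a, b) :: w → v ≠ [] → 2 ≤ pvCnt2 a b cs := by
  intro cs
  induction cs using pvCnt2.induct a b with
  | case1 x y t hab iht =>
    intro u v w hd hv
    rw [show pvCnt2 a b (x :: y :: t) = pvCnt2 a b t + 1 from by simp [pvCnt2, hab]]
    have hmem : (a, b) ∈ t.zip t.tail := by
      have h1 : (a, b) ∈ ((x :: y :: t).zip (x :: y :: t).tail).drop 2 := by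
        rw [hd]; exact pvMem_drop_two u v w (a, b) hv
      rw [pvAP_cons] at h1
      simp only [List.drop_succ_cons, List.drop_one] at h1
      rw [show ((y :: t).zip (y :: t).tail).tail = ((y :: t).zip (y :: t).tail).drop 1 from by simp,
        pvAP_drop_one] at h1
      exact h1
    have := (pvMem_zip_iff a b t).mp hmem
    omega
  | case2 x y t hab ihy =>
    intro u v w hd hv
    rw [pvAP_cons] at hd
    cases u with
    | nil =>
      rw [List.nil_append] at hd
      injection hd with h1 h2
      injection h1 with hx hy
      exact absurd ⟨hx, hy⟩ hab
    | cons u0 u' =>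
      simp only [List.cons_append, List.cons.injEq] at hd
      obtain ⟨-, hd⟩ := hd
      rw [show pvCnt2 a b (x :: y :: t) = pvCnt2 a b (y :: t) from by simp [pvCnt2, hab]]
      exact ihy u' v w hd hv
  | case3 t ht =>
    intro u v w hd hv
    match t, ht with
    | [], _ => simp at hd
    | [x], _ => simp at hd
    | x :: y :: t, ht => exact absurd rfl (ht x y t)

theorem pvCnt2_ge2_iff (a b : Char) (cs : List Char) :
    2 ≤ pvCnt2 a b cs ↔
      ∃ u v w, cs.zip cs.tail = u ++ (a, b) :: v ++ (a, b) :: w ∧ v ≠ [] := by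
  constructor
  · intro h2
    induction cs using pvCnt2.induct a b with
    | case1 x y t hab iht =>
      rw [show pvCnt2 a b (x :: y :: t) = pvCnt2 a b t + 1 from by simp [pvCnt2, hab]] at h2
      have hmem : (a, b) ∈ t.zip t.tail := (pvMem_zip_iff a b t).mpr (by omega)
      obtain ⟨u', w', hw⟩ := List.append_of_mem hmem
      cases t with
      | nil => simp at hmem
      | cons c t' =>
        refine ⟨[], (y, c) :: u', w', ?_, by simp⟩
        rw [pvAP_cons, pvAP_cons, hw, hab.1, hab.2]
        simp
    | case2 x y t hab ihy =>
      rw [show pvCnt2 a b (x :: y :: t) = pvCnt2 a b (y :: t) from by simp [pvCnt2, hab]] at h2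
      obtain ⟨u, v, w, hd, hv⟩ := ihy h2
      exact ⟨(x, y) :: u, v, w, by rw [pvAP_cons, hd]; simp, hv⟩
    | case3 t ht =>
      match t, ht with
      | [], _ => simp [pvCnt2] at h2
      | [x], _ => simp [pvCnt2] at h2
      | x :: y :: t, ht => exact absurd rfl (ht x y t)
  · rintro ⟨u, v, w, hd, hv⟩
    exact pvCnt2_ge2_of_decomp a b cs u v w hd hv

def pvRep {α : Type} (l : List α) : Prop := ∃ u q v w, l = u ++ q :: v ++ q :: w ∧ v ≠ []

def pvStep (st : PySem.Dict (Char × Char) Int × Bool) (ip : Int × (Char × Char)) :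
    PySem.Dict (Char × Char) Int × Bool :=
  if st.1.contains ip.2 then
    (st.1, if st.1.getD ip.2 0 ≤ ip.1 - 2 then true else st.2)
  else (st.1.insert ip.2 ip.1, st.2)

def pvF (l : List (Char × Char)) : PySem.Dict (Char × Char) Int × Bool :=
  (PySem.List.enumerate l 0).foldl pvStep (PySem.Dict.empty, false)

theorem pvF_snoc (l : List (Char × Char)) (p : Char × Char) :
    pvF (l ++ [p]) = pvStep (pvF l) ((l.length : Int), p) := by
  unfold pvF
  rw [PySem.List.enumerate_append, List.foldl_append]
  simp [PySem.List.enumerate]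

theorem pvIdx_min {α : Type} [BEq α] [LawfulBEq α] (u l v : List α) (p : α) (m : Nat)
    (hl : l = u ++ p :: v) (hi : PySem.List.index? l p = some m) : m ≤ u.length := by
  obtain ⟨hk, hkv, hmin⟩ := PySem.List.getElem_of_index?_eq_some hi
  by_contra hgt
  push Not at hgt
  have hup : l[u.length]'(by omega) = p := by
    subst hl
    rw [List.getElem_append_right (le_refl u.length)]
    simp
  exact hmin u.length (by omega) hup

theorem pvRep_nil {α : Type} : ¬ pvRep ([] : List α) := by
  rintro ⟨u, q, v, w, hl, -⟩
  cases u <;> simp at hl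

theorem pvRep_snoc {α : Type} (l : List α) (p : α) :
    pvRep (l ++ [p]) ↔ pvRep l ∨ ∃ u v, l = u ++ p :: v ∧ v ≠ [] := by
  constructor
  · rintro ⟨u, q, v, w, hl, hv⟩
    rcases List.eq_nil_or_concat w with rfl | ⟨w', x, rfl⟩
    · have hshape : u ++ q :: v ++ [q] = (u ++ q :: v) ++ [q] := by simp
      rw [hshape] at hl
      obtain ⟨h1, h2⟩ := List.append_inj' hl.symm rfl
      have hqp : q = p := by simpa using h2
      exact Or.inr ⟨u, v, by rw [← h1, hqp], hv⟩
    · have hshape : u ++ q :: v ++ q :: w'.concat x = (u ++ q :: v ++ q :: w') ++ [x] := by simp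
      rw [hshape] at hl
      obtain ⟨h1, h2⟩ := List.append_inj' hl.symm rfl
      exact Or.inl ⟨u, q, v, w', h1.symm, hv⟩
  · rintro (⟨u, q, v, w, hl, hv⟩ | ⟨u, v, hl, hv⟩)
    · exact ⟨u, q, v, w ++ [p], by rw [hl]; simp, hv⟩
    · exact ⟨u, p, v, [], by simp [hl], hv⟩

theorem pvSecond_iff {α : Type} [BEq α] [LawfulBEq α] (l : List α) (p : α) (m : Nat)
    (hi : PySem.List.index? l p = some m) :
    ((m : Int) ≤ (l.length : Int) - 2 ↔ ∃ u v, l = u ++ p :: v ∧ v ≠ []) := by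
  constructor
  · intro h
    obtain ⟨pre, suf, hl, hlen, -⟩ := (PySem.List.index?_eq_some_iff l p m).mp hi
    refine ⟨pre, suf, hl, ?_⟩
    intro hs
    subst hs
    rw [hl] at h
    simp [hlen] at h
    omega
  · rintro ⟨u, v, hl, hv⟩
    have hm := pvIdx_min u l v p m hl hi
    obtain ⟨v0, v', rfl⟩ := List.exists_cons_of_ne_nil hv
    rw [hl]
    simp
    omega

theorem pvInvariant (l : List (Char × Char)) :
    (∀ q, (pvF l).1.get? q = (PySem.List.index? l q).map (fun k => ((k : Nat) : Int))) ∧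
      ((pvF l).2 = true ↔ pvRep l) := by
  induction l using List.reverseRecOn with
  | nil =>
    constructor
    · intro q
      simp [pvF, PySem.List.enumerate, PySem.Dict.get?_empty, PySem.List.index?]
    · simp [pvF, PySem.List.enumerate]
      exact fun h => absurd h pvRep_nil
  | append_singleton l p ih =>
    obtain ⟨ihd, ihf⟩ := ih
    rw [pvF_snoc]
    by_cases hmem : p ∈ l
    · obtain ⟨m, hm⟩ : ∃ m : Nat, PySem.List.index? l p = some m := by
        cases hidx : PySem.List.index? l p with
        | none => exact absurd ((PySem.List.index?_eq_none_iff l p).mp hidx) (not_not.mpr hmem)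
        | some m => exact ⟨m, rfl⟩
      have hc : (pvF l).1.contains p = true := by
        rw [PySem.Dict.contains_eq_isSome_get?, ihd p, hm]; rfl
      have hg : (pvF l).1.getD p 0 = (m : Int) := by
        rw [PySem.Dict.getD_eq_get?_getD, ihd p, hm]; rfl
      unfold pvStep
      rw [hc]
      simp only [if_true]
      constructor
      · intro q
        by_cases hq : q ∈ l
        · rw [ihd q, PySem.List.index?_append_of_mem [p] hq]
        · have hqp : q ≠ p := fun h => hq (h ▸ hmem)
          have h1 : PySem.List.index? l q = none := (PySem.List.index?_eq_none_iff l q).mpr hq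
          have h2 : PySem.List.index? (l ++ [p]) q = none := by
            rw [PySem.List.index?_eq_none_iff]
            simp [hq, hqp]
          rw [ihd q, h1, h2]
      · rw [hg]
        rw [pvRep_snoc]
        by_cases hsec : (m : Int) ≤ ((l.length : Nat) : Int) - 2
        · simp only [hsec, if_true]
          simp only [true_iff]
          exact Or.inr ((pvSecond_iff l p m hm).mp hsec)
        · simp only [hsec, if_false]
          rw [ihf]
          constructor
          · exact Or.inl
          · rintro (h | h)
            · exact h
            · exact absurd ((pvSecond_iff l p m hm).mpr h) hsec
    · have hc : (pvF l).1.contains p = false := by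
        rw [PySem.Dict.contains_eq_isSome_get?, ihd p,
          (PySem.List.index?_eq_none_iff l p).mpr hmem]
        rfl
      unfold pvStep
      rw [hc]
      simp only [Bool.false_eq_true, if_false]
      constructor
      · intro q
        by_cases hqp : q = p
        · subst hqp
          rw [PySem.Dict.get?_insert_self, PySem.List.index?_append_singleton_self l q hmem]
          simp
        · rw [PySem.Dict.get?_insert_of_ne _ _ hqp]
          by_cases hq : q ∈ l
          · rw [ihd q, PySem.List.index?_append_of_mem [p] hq]
          · have h1 : PySem.List.index? l q = none := (PySem.List.index?_eq_none_iff l q).mpr hq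
            have h2 : PySem.List.index? (l ++ [p]) q = none := by
              rw [PySem.List.index?_eq_none_iff]
              simp [hq, hqp]
            rw [ihd q, h1, h2]
      · rw [ihf, pvRep_snoc]
        constructor
        · exact Or.inl
        · rintro (h | ⟨u, v, hl, hv⟩)
          · exact h
          · exact absurd (by rw [hl]; simp : p ∈ l) hmem


-- the common characterisation of condition 1: some adjacent pair repeats without overlap
theorem pvCondA1 (s : String) :
    ((PySem.Dict.counter ((s.toList.zip s.toList.tail).map
        (fun x => String.ofList [x.1, x.2]))).keys.any
      fun x => decide (1 < PySem.Str.count s x)) = true ↔ pvRep (s.toList.zip s.toList.tail) := by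
  rw [PySem.Dict.keys_counter]
  rw [List.any_eq_true]
  constructor
  · rintro ⟨x, hx, hcnt⟩
    rw [PySem.Set.mem_ofList] at hx
    obtain ⟨p, hp, rfl⟩ := List.mem_map.mp hx
    rw [decide_eq_true_iff] at hcnt
    have hcnt2 : 2 ≤ pvCnt2 p.1 p.2 s.toList := by
      have : PySem.Str.count s (String.ofList [p.1, p.2]) = pvCnt2 p.1 p.2 s.toList := by
        rw [PySem.Str.count, String.toList_ofList, pvCount_eq_cnt2]
      omega
    obtain ⟨u, v, w, hd, hv⟩ := (pvCnt2_ge2_iff p.1 p.2 s.toList).mp hcnt2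
    exact ⟨u, (p.1, p.2), v, w, hd, hv⟩
  · rintro ⟨u, q, v, w, hd, hv⟩
    obtain ⟨a, b⟩ := q
    have hmem : (a, b) ∈ s.toList.zip s.toList.tail := by rw [hd]; simp
    refine ⟨String.ofList [a, b], ?_, ?_⟩
    · rw [PySem.Set.mem_ofList]
      exact List.mem_map.mpr ⟨(a, b), hmem, rfl⟩
    · rw [decide_eq_true_iff]
      have : PySem.Str.count s (String.ofList [a, b]) = pvCnt2 a b s.toList := by
        rw [PySem.Str.count, String.toList_ofList, pvCount_eq_cnt2]
      have h2 := (pvCnt2_ge2_iff a b s.toList).mpr ⟨u, v, w, hd, hv⟩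
      omega

theorem pvFoldlAny (l : List (Char × Char)) : ∀ (acc : Bool),
    l.foldl (fun acc xz => if xz.1 == xz.2 then true else acc) acc
      = (acc || l.any fun xz => xz.1 == xz.2) := by
  induction l with
  | nil => intro acc; simp
  | cons x t ih =>
    intro acc
    simp only [List.foldl_cons, List.any_cons]
    by_cases h : (x.1 == x.2) = true
    · rw [if_pos h, ih, h]
      simp
    · rw [if_neg h, ih]
      simp only [Bool.not_eq_true] at h
      rw [h]
      simp

-- condition 2 of both ports: some character equals the one two places later
theorem pvCond2 (s : String) :
    ((PySem.List.pyRange 0 (PySem.Str.len s - 2) 1).any fun i =>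
        PySem.Str.pyGet? s i == PySem.Str.pyGet? s (i + 2))
      = (s.toList.zip (PySem.List.slice s.toList (some 2) none)).foldl
          (fun acc xz => if xz.1 == xz.2 then true else acc) false := by
  rw [pvFoldlAny, Bool.false_or, PySem.List.slice_from s.toList (by omega : (0:Int) ≤ 2)]
  rw [Bool.eq_iff_iff, List.any_eq_true, List.any_eq_true]
  have hdrop : (2 : Int).toNat = 2 := rfl
  rw [hdrop]
  have hlen : PySem.Str.len s = (s.toList.length : Int) := PySem.Str.len_eq s
  have eget : ∀ (k : Nat), k < s.toList.length →
      PySem.Str.pyGet? s (k : Int) = s.toList[k]? := by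
    intro k hk
    rw [PySem.Str.pyGet?, PySem.Chars.pyGet?]
    exact PySem.List.pyGet?_natCast s.toList k
  constructor
  · rintro ⟨i, hi, hbeq⟩
    rw [PySem.List.mem_pyRange_one] at hi
    obtain ⟨h0, hlt⟩ := hi
    rw [hlen] at hlt
    obtain ⟨k, rfl⟩ : ∃ k : Nat, i = (k : Int) := ⟨i.toNat, (Int.toNat_of_nonneg h0).symm⟩
    have hk2 : k + 2 < s.toList.length := by omega
    refine ⟨(s.toList[k]'(by omega), s.toList[k+2]'hk2), ?_, ?_⟩
    · rw [List.mem_iff_getElem]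
      refine ⟨k, by rw [List.length_zip, List.length_drop]; omega, ?_⟩
      rw [List.getElem_zip]
      congr 1
      rw [List.getElem_drop]
      congr 1
      omega
    · have e1 : PySem.Str.pyGet? s (k : Int) = some (s.toList[k]'(by omega)) := by
        rw [eget k (by omega)]
        exact List.getElem?_eq_getElem _
      have e2 : PySem.Str.pyGet? s ((k : Int) + 2) = some (s.toList[k+2]'hk2) := by
        rw [show ((k : Int) + 2) = ((k + 2 : Nat) : Int) by push_cast; ring]
        rw [eget (k+2) hk2]
        exact List.getElem?_eq_getElem _
      rw [e1, e2] at hbeq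
      simpa using hbeq
  · rintro ⟨xz, hmem, hbeq⟩
    rw [List.mem_iff_getElem] at hmem
    obtain ⟨k, hk, hxz⟩ := hmem
    subst hxz
    rw [List.length_zip, List.length_drop] at hk
    have hk2 : k + 2 < s.toList.length := by omega
    rw [List.getElem_zip] at hbeq
    have hdk : (s.toList.drop 2)[k]'(by rw [List.length_drop]; omega) = s.toList[k+2]'hk2 := by
      rw [List.getElem_drop]
      congr 1
      omega
    simp only [hdk] at hbeq
    refine ⟨(k : Int), ?_, ?_⟩
    · rw [PySem.List.mem_pyRange_one, hlen]
      omega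
    · have e1 : PySem.Str.pyGet? s (k : Int) = some (s.toList[k]'(by omega)) := by
        rw [eget k (by omega)]
        exact List.getElem?_eq_getElem _
      have e2 : PySem.Str.pyGet? s ((k : Int) + 2) = some (s.toList[k+2]'hk2) := by
        rw [show ((k : Int) + 2) = ((k + 2 : Nat) : Int) by push_cast; ring]
        rw [eget (k+2) hk2]
        exact List.getElem?_eq_getElem _
      rw [e1, e2]
      simpa using hbeq

-- per-line bodies of the two folds agree
theorem pvBody_eq (nice : Int) (s : String) :
    (let c := PySem.Dict.counter ((s.toList.zip s.toList.tail).map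
               (fun x => String.ofList [x.1, x.2]))
     if !(c.keys.any fun x => decide (1 < PySem.Str.count s x)) then nice
     else if !((PySem.List.pyRange 0 (PySem.Str.len s - 2) 1).any fun i =>
        PySem.Str.pyGet? s i == PySem.Str.pyGet? s (i + 2)) then nice
     else nice + 1)
      = (if pvLineNice s then nice + 1 else nice) := by
  have h1 : ((PySem.Dict.counter ((s.toList.zip s.toList.tail).map
               (fun x => String.ofList [x.1, x.2]))).keys.any
      fun x => decide (1 < PySem.Str.count s x)) = (pvF (s.toList.zip s.toList.tail)).2 := by
    rw [Bool.eq_iff_iff, pvCondA1]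
    exact (pvInvariant (s.toList.zip s.toList.tail)).2.symm
  have h2 := pvCond2 s
  have hB : pvLineNice s = ((pvF (s.toList.zip s.toList.tail)).2
      && (s.toList.zip (PySem.List.slice s.toList (some 2) none)).foldl
          (fun acc xz => if xz.1 == xz.2 then true else acc) false) := rfl
  simp only [h1, ← h2, hB]
  cases hc1 : (pvF (s.toList.zip s.toList.tail)).2 <;>
    cases hc2 : ((PySem.List.pyRange 0 (PySem.Str.len s - 2) 1).any fun i =>
      PySem.Str.pyGet? s i == PySem.Str.pyGet? s (i + 2)) <;> simp

-- ===== VERDICT (by name: the statement is the Claim_ definition above) =====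
theorem part_2_spec : Claim_equal_part_2 := by
  intro strings _
  unfold Spec_part_2 part_2 part_2_alt
  have hf : (fun (nice : Int) (string : String) =>
      let c := PySem.Dict.counter ((string.toList.zip string.toList.tail).map
               (fun x => String.ofList [x.1, x.2]))
      if !(c.keys.any fun x => decide (1 < PySem.Str.count string x)) then nice
      else if !((PySem.List.pyRange 0 (PySem.Str.len string - 2) 1).any fun i =>
          PySem.Str.pyGet? string i == PySem.Str.pyGet? string (i + 2)) then nice
      else nice + 1)
      = (fun (nice : Int) (s : String) => if pvLineNice s then nice + 1 else nice) := by
    funext nice s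
    exact pvBody_eq nice s
  rw [hf]
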